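-- pv_equiv track=rewrite | github.com/lhlee99/COMP3270-assignments | a2/sandbox.py | transform
-- ===== SOURCE A (Python) =====
-- def transform(board, xy):
--     tmp = list(board)
--     if xy == 'x':
--         for i in range(3):
--             tmp[i*3] = board[i*3 + 2]
--             tmp[i*3 + 2] = board[i*3]
--
--     elif xy == 'y':
--         for i in range(3):
--             tmp[i] = board[i + 6]
--             tmp[i + 6] = board[i]
--     elif xy == 'r':
--         tmp[0] = board[6]
--         tmp[1] = board[3]
--         tmp[2] = board[0]
--         tmp[3] = board[7]
--         tmp[4] = board[4]
--         tmp[5] = board[1]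
--         tmp[6] = board[8]
--         tmp[7] = board[5]
--         tmp[8] = board[2]
--     return tmp
-- ===== SOURCE B (Python) =====
-- def transform(board, xy):
--     r0, r1, r2 = list(board[0:3]), list(board[3:6]), list(board[6:9])
--     if xy == 'x':
--         rows = [r0[::-1], r1[::-1], r2[::-1]]
--     elif xy == 'y':
--         rows = [r2, r1, r0]
--     elif xy == 'r':
--         rows = [list(c[::-1]) for c in zip(r0, r1, r2)]
--     else:
--         return list(board)
--     return rows[0] + rows[1] + rows[2] + list(board[9:])
-- ===== Notes on version B (the rewrite author's own statement) =====
-- stated objective: idiomatic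
-- what changed: B reshapes the flat board into three rows and expresses 'x' as reversing each row, 'y' as reversing the row order, and 'r' as transpose-with-reversal (zip of the rows, each column reversed), then flattens back and re-appends the tail beyond index 8, instead of A's element-by-element index assignments into a copy.
import Mathlib
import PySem

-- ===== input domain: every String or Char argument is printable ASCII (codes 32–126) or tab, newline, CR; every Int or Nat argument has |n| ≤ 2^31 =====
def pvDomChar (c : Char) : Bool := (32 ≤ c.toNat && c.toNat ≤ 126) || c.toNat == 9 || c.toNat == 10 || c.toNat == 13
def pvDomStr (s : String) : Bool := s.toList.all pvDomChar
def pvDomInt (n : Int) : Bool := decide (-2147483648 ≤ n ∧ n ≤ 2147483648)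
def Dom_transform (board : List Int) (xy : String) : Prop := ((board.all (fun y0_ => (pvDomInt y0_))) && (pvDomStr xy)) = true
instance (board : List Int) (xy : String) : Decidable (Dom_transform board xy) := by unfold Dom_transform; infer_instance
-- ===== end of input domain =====

-- B restates the transforms on a 3x3 row structure (reverse rows / reverse row order / transpose-and-reverse) instead of A's per-index assignments; same cost, more idiomatic.

-- ===== PORT A =====
def transform (board : List Int) (xy : String) : List Int :=
  let tmp := board
  if xy = "x" then
    (PySem.List.pyRange 0 3 1).foldl (fun tmp i =>
      let tmp := PySem.List.pySetD tmp (i*3) (PySem.List.pyGetD board (i*3 + 2) 0)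
      PySem.List.pySetD tmp (i*3 + 2) (PySem.List.pyGetD board (i*3) 0)) tmp
  else if xy = "y" then
    (PySem.List.pyRange 0 3 1).foldl (fun tmp i =>
      let tmp := PySem.List.pySetD tmp i (PySem.List.pyGetD board (i + 6) 0)
      PySem.List.pySetD tmp (i + 6) (PySem.List.pyGetD board i 0)) tmp
  else if xy = "r" then
    let tmp := PySem.List.pySetD tmp 0 (PySem.List.pyGetD board 6 0)
    let tmp := PySem.List.pySetD tmp 1 (PySem.List.pyGetD board 3 0)
    let tmp := PySem.List.pySetD tmp 2 (PySem.List.pyGetD board 0 0)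
    let tmp := PySem.List.pySetD tmp 3 (PySem.List.pyGetD board 7 0)
    let tmp := PySem.List.pySetD tmp 4 (PySem.List.pyGetD board 4 0)
    let tmp := PySem.List.pySetD tmp 5 (PySem.List.pyGetD board 1 0)
    let tmp := PySem.List.pySetD tmp 6 (PySem.List.pyGetD board 8 0)
    let tmp := PySem.List.pySetD tmp 7 (PySem.List.pyGetD board 5 0)
    PySem.List.pySetD tmp 8 (PySem.List.pyGetD board 2 0)
  else tmp

-- ===== PORT B =====
def transform_alt (board : List Int) (xy : String) : List Int :=
  let r0 := PySem.List.slice board (some 0) (some 3)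
  let r1 := PySem.List.slice board (some 3) (some 6)
  let r2 := PySem.List.slice board (some 6) (some 9)
  if xy = "x" then
    (r0.reverse ++ r1.reverse ++ r2.reverse) ++ PySem.List.slice board (some 9) none
  else if xy = "y" then
    (r2 ++ r1 ++ r0) ++ PySem.List.slice board (some 9) none
  else if xy = "r" then
    let cols := (r0.zip (r1.zip r2)).map (fun p => [p.2.2, p.2.1, p.1])
    (cols.getD 0 [] ++ cols.getD 1 [] ++ cols.getD 2 []) ++ PySem.List.slice board (some 9) none
  else board

-- ===== PRECONDITION & SPEC =====
-- Pre_ excludes exactly the inputs where A raises IndexError: a transforming xy with a board shorter than 9.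
def Pre_transform (board : List Int) (xy : String) : Prop :=
  (xy = "x" ∨ xy = "y" ∨ xy = "r") → 9 ≤ board.length
instance (board : List Int) (xy : String) : Decidable (Pre_transform board xy) := by unfold Pre_transform; infer_instance
def pvWitness_transform : List Int × String := ([0, 1, 2, 3, 4, 5, 6, 7, 8], "r")

def Spec_transform (board : List Int) (xy : String) (out : List Int) : Prop := out = transform_alt board xy
instance (board : List Int) (xy : String) (out : List Int) : Decidable (Spec_transform board xy out) := by unfold Spec_transform; infer_instance

-- ===== CLAIM (what is proved, stated in full; the proofs are below) =====
def Claim_equal_transform : Prop := ∀ (board : List Int) (xy : String), Dom_transform board xy → Pre_transform board xy → Spec_transform board xy (transform board xy)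

-- ===== LEMMAS AND PROOFS =====
theorem pvSlice03 (xs : List Int) : PySem.List.slice xs (some 0) (some 3) = xs.take 3 := by
  have h := PySem.List.slice_to_natCast (xs := xs) (b := 3); simp at h; simpa using h
theorem pvSlice36 (xs : List Int) : PySem.List.slice xs (some 3) (some 6) = (xs.drop 3).take 3 := by
  have h := PySem.List.slice_natCast (xs := xs) (a := 3) (b := 6); simpa using h
theorem pvSlice69 (xs : List Int) : PySem.List.slice xs (some 6) (some 9) = (xs.drop 6).take 3 := by
  have h := PySem.List.slice_natCast (xs := xs) (a := 6) (b := 9); simpa using h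
theorem pvSlice9 (xs : List Int) : PySem.List.slice xs (some 9) none = xs.drop 9 := by
  have h := PySem.List.slice_from_natCast (xs := xs) (a := 9); simpa using h
theorem pvRange3 : PySem.List.pyRange 0 3 1 = [0, 1, 2] := by decide
theorem pvDecomp (xs : List Int) (hl : 9 ≤ xs.length) :
    ∃ a b c d e f g h i t, xs = a::b::c::d::e::f::g::h::i::t := by
  rcases xs with _|⟨a,_|⟨b,_|⟨c,_|⟨d,_|⟨e,_|⟨f,_|⟨g,_|⟨h,_|⟨i,t⟩⟩⟩⟩⟩⟩⟩⟩⟩ <;>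
    first
      | exact ⟨_,_,_,_,_,_,_,_,_,_,rfl⟩
      | (exfalso; simp at hl)

-- ===== VERDICT (by name: the statement is the Claim_ definition above) =====
theorem transform_spec : Claim_equal_transform := by
  intro board xy _ hpre
  unfold Spec_transform
  by_cases hx : xy = "x"
  · subst hx
    obtain ⟨a,b,c,d,e,f,g,h,i,t,rfl⟩ := pvDecomp board (hpre (Or.inl rfl))
    simp only [transform, String.reduceEq, reduceIte, pvRange3]
    simp only [List.foldl]
    simp only [transform_alt, String.reduceEq, reduceIte,
      pvSlice03, pvSlice36, pvSlice69, pvSlice9]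
    norm_num
    simp [PySem.List.pySetD_of_nonneg, PySem.List.pyGetD_ofNat', List.set]
  · by_cases hy : xy = "y"
    · subst hy
      obtain ⟨a,b,c,d,e,f,g,h,i,t,rfl⟩ := pvDecomp board (hpre (Or.inr (Or.inl rfl)))
      simp only [transform, String.reduceEq, reduceIte, pvRange3]
      simp only [List.foldl]
      simp only [transform_alt, String.reduceEq, reduceIte,
        pvSlice03, pvSlice36, pvSlice69, pvSlice9]
      norm_num
      simp [PySem.List.pySetD_of_nonneg, PySem.List.pyGetD_ofNat', List.set]
    · by_cases hr : xy = "r"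
      · subst hr
        obtain ⟨a,b,c,d,e,f,g,h,i,t,rfl⟩ := pvDecomp board (hpre (Or.inr (Or.inr rfl)))
        simp only [transform, String.reduceEq, reduceIte]
        simp only [transform_alt, String.reduceEq, reduceIte,
          pvSlice03, pvSlice36, pvSlice69, pvSlice9]
        norm_num
        simp [PySem.List.pySetD_of_nonneg, PySem.List.pyGetD_ofNat', List.set]
      · simp [transform, transform_alt, hx, hy, hr]
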